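-- pv_equiv track=rewrite | github.com/wweJs/aos-src | scriptengine.py | find_else_or_end
-- ===== SOURCE A (Python) =====
-- def find_else_or_end(script_lines, start_index):
--     depth = 1
--     for i in range(start_index + 1, len(script_lines)):
--         line = script_lines[i]
--         if line.startswith("for") or line.startswith("while true") or line.startswith("if"):
--             depth += 1
--         elif line.startswith("end"):
--             depth -= 1
--             if depth == 0:
--                 return i
--         elif line.startswith("else") and depth == 1:
--             return i
--     return len(script_lines)
-- ===== SOURCE B (Python) =====
-- def find_else_or_end(script_lines, start_index):
--     n = len(script_lines)
--
--     def opener(line):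
--         return line.startswith("for") or line.startswith("while true") or line.startswith("if")
--
--     def skip_block(j):
--         # j: first index inside a nested block; return the index just after
--         # that block's matching 'end' (n if the block is unterminated).
--         while j < n:
--             line = script_lines[j]
--             if opener(line):
--                 j = skip_block(j + 1)
--             elif line.startswith("end"):
--                 return j + 1
--             else:
--                 j += 1
--         return n
--
--     i = start_index + 1
--     while i < n:
--         line = script_lines[i]
--         if opener(line):
--             i = skip_block(i + 1)
--         elif line.startswith("end") or line.startswith("else"):
--             return i
--         else:
--             i += 1
--     return n
-- ===== Notes on version B (the rewrite author's own statement) =====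
-- stated objective: alternative
-- what changed: Replaces A's single scan with an explicit nesting-depth counter by a recursive decomposition: a top-level scanner that, at a nested opener, calls a recursive skip_block which consumes the whole nested block up to its matching 'end'.
import Mathlib
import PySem

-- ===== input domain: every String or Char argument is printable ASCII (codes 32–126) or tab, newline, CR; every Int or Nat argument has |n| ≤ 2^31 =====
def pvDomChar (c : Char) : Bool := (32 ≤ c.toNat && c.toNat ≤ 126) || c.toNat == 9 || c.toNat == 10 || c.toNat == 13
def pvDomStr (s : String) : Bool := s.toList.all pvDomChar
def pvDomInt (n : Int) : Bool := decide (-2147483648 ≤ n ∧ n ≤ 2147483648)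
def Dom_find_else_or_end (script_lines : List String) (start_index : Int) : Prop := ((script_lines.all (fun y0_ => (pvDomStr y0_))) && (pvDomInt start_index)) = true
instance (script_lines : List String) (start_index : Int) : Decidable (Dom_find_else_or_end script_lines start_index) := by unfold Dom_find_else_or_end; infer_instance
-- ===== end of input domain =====

-- B replaces A's single linear pass with an explicit depth counter by a recursive
-- decomposition: a scanner that, at a nested opener, delegates to a recursive
-- skip_block consuming the whole nested block (objective: alternative, not faster).

-- ===== PORT A =====
-- A's for-loop over range(start_index+1, len) carrying `depth`; early returns become results.
def pvGoA (xs : List String) : List Int → Int → Int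
  | [], _ => (xs.length : Int)
  | i :: rest, depth =>
    match PySem.List.pyGet? xs i with
    | none => 0  -- IndexError in Python; excluded by Pre_
    | some line =>
      if PySem.Str.startswith line "for" || PySem.Str.startswith line "while true" || PySem.Str.startswith line "if" then
        pvGoA xs rest (depth + 1)
      else if PySem.Str.startswith line "end" then
        (if depth - 1 = 0 then i else pvGoA xs rest (depth - 1))
      else if PySem.Str.startswith line "else" && depth == 1 then i
      else pvGoA xs rest depth

def find_else_or_end (script_lines : List String) (start_index : Int) : Int :=
  pvGoA script_lines (PySem.List.pyRange (start_index + 1) (script_lines.length : Int) 1) 1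

-- ===== PORT B =====
-- Source B's opener helper
def pvOpener (line : String) : Bool :=
  PySem.Str.startswith line "for" || PySem.Str.startswith line "while true" || PySem.Str.startswith line "if"

-- skip_block: j is the first index inside a nested block; return the index just after
-- that block's matching 'end' (len if unterminated).  Fuel bounds the number of loop
-- steps (the index strictly grows towards len, so the port's calls never exhaust it).
def pvSkipB (xs : List String) : Nat → Int → Int
  | 0, j => j
  | f + 1, j =>
    if j < (xs.length : Int) then
      match PySem.List.pyGet? xs j with
      | none => (xs.length : Int)  -- IndexError in Python; excluded by Pre_
      | some line =>
        if pvOpener line then pvSkipB xs f (pvSkipB xs f (j + 1))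
        else if PySem.Str.startswith line "end" then j + 1
        else pvSkipB xs f (j + 1)
    else (xs.length : Int)

-- the outer while loop of Source B
def pvScanB (xs : List String) : Nat → Int → Int
  | 0, _ => (xs.length : Int)
  | f + 1, i =>
    if i < (xs.length : Int) then
      match PySem.List.pyGet? xs i with
      | none => 0  -- IndexError in Python; excluded by Pre_
      | some line =>
        if pvOpener line then pvScanB xs f (pvSkipB xs f (i + 1))
        else if PySem.Str.startswith line "end" || PySem.Str.startswith line "else" then i
        else pvScanB xs f (i + 1)
    else (xs.length : Int)

def find_else_or_end_alt (script_lines : List String) (start_index : Int) : Int :=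
  pvScanB script_lines ((script_lines.length : Int) - (start_index + 1)).toNat (start_index + 1)

-- ===== PRECONDITION & SPEC =====
-- Pre_ excludes exactly the inputs where A raises IndexError (first scanned index
-- below -len(script_lines)); B raises there too.
def Pre_find_else_or_end (script_lines : List String) (start_index : Int) : Prop :=
  -(script_lines.length : Int) ≤ start_index + 1

instance (script_lines : List String) (start_index : Int) : Decidable (Pre_find_else_or_end script_lines start_index) := by
  unfold Pre_find_else_or_end; infer_instance

def pvWitness_find_else_or_end : List String × Int := (["if x", "y", "else", "end"], 0)

def Spec_find_else_or_end (script_lines : List String) (start_index : Int) (out : Int) : Prop := out = find_else_or_end_alt script_lines start_index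
instance (script_lines : List String) (start_index : Int) (out : Int) : Decidable (Spec_find_else_or_end script_lines start_index out) := by unfold Spec_find_else_or_end; infer_instance

-- ===== CLAIM (what is proved, stated in full; the proofs are below) =====
def Claim_equal_find_else_or_end : Prop := ∀ (script_lines : List String) (start_index : Int), Dom_find_else_or_end script_lines start_index → Pre_find_else_or_end script_lines start_index → Spec_find_else_or_end script_lines start_index (find_else_or_end script_lines start_index)

-- ===== LEMMAS AND PROOFS =====

-- skip_block never moves the index backwards nor past the end
lemma pvSkipB_bounds (xs : List String) : ∀ (f : Nat) (j : Int), j ≤ (xs.length : Int) →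
    j ≤ pvSkipB xs f j ∧ pvSkipB xs f j ≤ (xs.length : Int) := by
  intro f
  induction f with
  | zero => intro j hj; exact ⟨le_rfl, hj⟩
  | succ f ih =>
    intro j hj
    simp only [pvSkipB]
    by_cases hlt : j < (xs.length : Int)
    · rw [if_pos hlt]
      cases PySem.List.pyGet? xs j with
      | none => exact ⟨hj, le_rfl⟩
      | some line =>
        dsimp only
        split_ifs with h1 h2
        · obtain ⟨a1, a2⟩ := ih (j + 1) (by omega)
          obtain ⟨b1, b2⟩ := ih (pvSkipB xs f (j + 1)) a2
          exact ⟨by omega, b2⟩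
        · omega
        · obtain ⟨a1, a2⟩ := ih (j + 1) (by omega)
          exact ⟨by omega, a2⟩
    · rw [if_neg hlt]; exact ⟨hj, le_rfl⟩

-- inside a nested block, A's pass at depth d+2 equals skipping the whole block
-- (via skip_block) and continuing at depth d+1
lemma pvGoA_skipB (xs : List String) : ∀ (f : Nat) (j : Int),
    -(xs.length : Int) ≤ j → j ≤ (xs.length : Int) → ((xs.length : Int) - j).toNat ≤ f → ∀ (d : Nat),
    pvGoA xs (PySem.List.pyRange j (xs.length : Int) 1) ((d : Int) + 2) =
      pvGoA xs (PySem.List.pyRange (pvSkipB xs f j) (xs.length : Int) 1) ((d : Int) + 1) := by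
  intro f
  induction f with
  | zero =>
    intro j _ _ hf d
    have hj : (xs.length : Int) ≤ j := by omega
    simp [pvSkipB, PySem.List.pyRange_one_eq_nil hj, pvGoA]
  | succ f ih =>
    intro j hlo hhi hf d
    by_cases hlt : j < (xs.length : Int)
    · have hr : PySem.Raise.InRange xs.length j := by constructor <;> omega
      cases hg : PySem.List.pyGet? xs j with
      | none => exact absurd hr ((PySem.List.pyGet?_eq_none_iff _ _).mp hg)
      | some line =>
        rw [PySem.List.pyRange_one_cons hlt]
        simp only [pvGoA, pvSkipB, pvOpener, hg, if_pos hlt]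
        by_cases hop : PySem.Str.startswith line "for" || PySem.Str.startswith line "while true" || PySem.Str.startswith line "if"
        · simp only [hop, if_true]
          have e1 : (d : Int) + 2 + 1 = ((d + 1 : Nat) : Int) + 2 := by push_cast; ring
          have e2 : ((d + 1 : Nat) : Int) + 1 = (d : Int) + 2 := by push_cast; ring
          obtain ⟨a1, a2⟩ := pvSkipB_bounds xs f (j + 1) (by omega)
          rw [e1, ih (j + 1) (by omega) (by omega) (by omega) (d + 1), e2,
            ih (pvSkipB xs f (j + 1)) (by omega) a2 (by omega) d]
        · simp only [hop, if_false]
          by_cases hend : PySem.Str.startswith line "end"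
          · simp only [hend, if_true]
            rw [if_neg (by omega : ¬ ((d : Int) + 2 - 1 = 0))]
            have e : (d : Int) + 2 - 1 = (d : Int) + 1 := by ring
            rw [e]
            simp
          · simp only [hend, if_false]
            have hcond : (((d : Int) + 2) == 1) = false := by
              rw [beq_eq_false_iff_ne]; omega
            simp only [hcond, Bool.and_false, if_false]
            exact ih (j + 1) (by omega) (by omega) (by omega) d
    · have hj : (xs.length : Int) ≤ j := by omega
      simp [pvSkipB, if_neg hlt, PySem.List.pyRange_one_eq_nil hj,
        PySem.List.pyRange_one_eq_nil (le_refl (xs.length : Int)), pvGoA]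

-- main lemma: A's top-level pass at depth 1 equals B's scanner
lemma pvGoA_scanB (xs : List String) : ∀ (f : Nat) (j : Int),
    -(xs.length : Int) ≤ j → ((xs.length : Int) - j).toNat ≤ f →
    pvGoA xs (PySem.List.pyRange j (xs.length : Int) 1) 1 = pvScanB xs f j := by
  intro f
  induction f with
  | zero =>
    intro j _ hf
    have hj : (xs.length : Int) ≤ j := by omega
    simp [pvScanB, PySem.List.pyRange_one_eq_nil hj, pvGoA]
  | succ f ih =>
    intro j hlo hf
    by_cases hlt : j < (xs.length : Int)
    · have hr : PySem.Raise.InRange xs.length j := by constructor <;> omega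
      cases hg : PySem.List.pyGet? xs j with
      | none => exact absurd hr ((PySem.List.pyGet?_eq_none_iff _ _).mp hg)
      | some line =>
        rw [PySem.List.pyRange_one_cons hlt]
        simp only [pvGoA, pvScanB, pvOpener, hg, if_pos hlt]
        by_cases hop : PySem.Str.startswith line "for" || PySem.Str.startswith line "while true" || PySem.Str.startswith line "if"
        · simp only [hop, if_true]
          have e1 : (1 : Int) + 1 = ((0 : Nat) : Int) + 2 := by norm_num
          have e2 : ((0 : Nat) : Int) + 1 = (1 : Int) := by norm_num
          obtain ⟨a1, a2⟩ := pvSkipB_bounds xs f (j + 1) (by omega)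
          rw [e1, pvGoA_skipB xs f (j + 1) (by omega) (by omega) (by omega) 0, e2,
            ih (pvSkipB xs f (j + 1)) (by omega) (by omega)]
        · simp only [hop, if_false]
          by_cases hend : PySem.Str.startswith line "end"
          · simp only [hend, Bool.true_or, if_true]
            norm_num
          · simp only [hend, Bool.false_or, if_false]
            by_cases helse : PySem.Str.startswith line "else"
            · simp only [helse, Bool.true_and, if_true]
              norm_num
            · simp only [helse, Bool.false_and, if_false]
              exact ih (j + 1) (by omega) (by omega)
    · have hj : (xs.length : Int) ≤ j := by omega
      simp [pvScanB, if_neg hlt, PySem.List.pyRange_one_eq_nil hj, pvGoA]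

-- ===== VERDICT (by name: the statement is the Claim_ definition above) =====
theorem find_else_or_end_spec : Claim_equal_find_else_or_end := by
  intro xs s _dom pre
  unfold Spec_find_else_or_end find_else_or_end find_else_or_end_alt
  exact pvGoA_scanB xs ((xs.length : Int) - (s + 1)).toNat (s + 1) pre le_rfl
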